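-- pv_equiv track=rewrite | github.com/AdamCBartnik/GPT_plotly | GPT_plotly/tools.py | get_y_label
-- ===== SOURCE A (Python) =====
-- def get_y_label(var):
--     ylabel_str = '\mbox{Value}'
--     if all('norm_' in var_str for var_str in var):
--         ylabel_str = '\mbox{Emittance}'
--     if all('slice_emit' in var_str for var_str in var):
--         ylabel_str = '\mbox{Slice Emittance}'
--     if all('sigma_' in var_str for var_str in var):
--         ylabel_str = '\mbox{Beam Size}'
--     if all('sigma_t' in var_str for var_str in var):
--         ylabel_str = '\mbox{Bunch Length}'
--     if all('charge' in var_str for var_str in var):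
--         ylabel_str = '\mbox{Charge}'
--     if all('energy' in var_str for var_str in var):
--         ylabel_str = '\mbox{Energy}'
--
--     return ylabel_str
-- ===== SOURCE B (Python) =====
-- def get_y_label(var):
--     # one pass over var: keep a vector of six flags, ANDing in each string's memberships
--     table = [('norm_', '\\mbox{Emittance}'),
--              ('slice_emit', '\\mbox{Slice Emittance}'),
--              ('sigma_', '\\mbox{Beam Size}'),
--              ('sigma_t', '\\mbox{Bunch Length}'),
--              ('charge', '\\mbox{Charge}'),
--              ('energy', '\\mbox{Energy}')]
--     flags = [True] * len(table)
--     for s in var: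
--         flags = [f and sub in s for f, (sub, _) in zip(flags, table)]
--     result = '\\mbox{Value}'
--     for f, (_, label) in zip(flags, table):
--         if f:
--             result = label
--     return result
-- ===== Notes on version B (the rewrite author's own statement) =====
-- stated objective: alternative
-- what changed: Instead of six separate all()-passes over the whole list, B traverses var once, maintaining a six-element boolean flag vector ANDed pointwise with each string's substring memberships, then selects the label by a final priority scan over the flags.
import Mathlib
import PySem

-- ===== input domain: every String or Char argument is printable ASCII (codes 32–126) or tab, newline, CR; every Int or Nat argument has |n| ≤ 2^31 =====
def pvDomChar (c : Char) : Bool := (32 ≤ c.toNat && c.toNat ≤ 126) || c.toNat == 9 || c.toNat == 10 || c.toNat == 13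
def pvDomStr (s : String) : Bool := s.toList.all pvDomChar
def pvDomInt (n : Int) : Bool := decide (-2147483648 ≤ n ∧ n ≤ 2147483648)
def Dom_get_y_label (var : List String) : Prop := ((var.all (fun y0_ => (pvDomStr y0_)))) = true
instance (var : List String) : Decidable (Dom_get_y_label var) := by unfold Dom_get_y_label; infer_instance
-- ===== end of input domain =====

-- B traverses var once, ANDing a six-element flag vector, then does one priority
-- scan over the flags, instead of A's six separate all()-passes; same result.

-- ===== PORT A =====
def get_y_label (var : List String) : String :=
  let ylabel_str := "\\mbox{Value}"
  let ylabel_str := if var.all (fun var_str => PySem.Str.isIn "norm_" var_str) then "\\mbox{Emittance}" else ylabel_str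
  let ylabel_str := if var.all (fun var_str => PySem.Str.isIn "slice_emit" var_str) then "\\mbox{Slice Emittance}" else ylabel_str
  let ylabel_str := if var.all (fun var_str => PySem.Str.isIn "sigma_" var_str) then "\\mbox{Beam Size}" else ylabel_str
  let ylabel_str := if var.all (fun var_str => PySem.Str.isIn "sigma_t" var_str) then "\\mbox{Bunch Length}" else ylabel_str
  let ylabel_str := if var.all (fun var_str => PySem.Str.isIn "charge" var_str) then "\\mbox{Charge}" else ylabel_str
  let ylabel_str := if var.all (fun var_str => PySem.Str.isIn "energy" var_str) then "\\mbox{Energy}" else ylabel_str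
  ylabel_str

-- ===== PORT B =====
def pvTable : List (String × String) :=
  [("norm_", "\\mbox{Emittance}"),
   ("slice_emit", "\\mbox{Slice Emittance}"),
   ("sigma_", "\\mbox{Beam Size}"),
   ("sigma_t", "\\mbox{Bunch Length}"),
   ("charge", "\\mbox{Charge}"),
   ("energy", "\\mbox{Energy}")]

-- one step of the single pass: AND string s's memberships into the flag vector
def pvStep (flags : List Bool) (s : String) : List Bool :=
  (flags.zip pvTable).map (fun fp => fp.1 && PySem.Str.isIn fp.2.1 s)

def get_y_label_alt (var : List String) : String :=
  let flags := var.foldl pvStep (List.replicate pvTable.length true)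
  (flags.zip pvTable).foldl (fun res fp => if fp.1 then fp.2.2 else res) "\\mbox{Value}"

-- ===== PRECONDITION & SPEC =====
def Spec_get_y_label (var : List String) (out : String) : Prop := out = get_y_label_alt var
instance (var : List String) (out : String) : Decidable (Spec_get_y_label var out) := by unfold Spec_get_y_label; infer_instance

-- ===== CLAIM (what is proved, stated in full; the proofs are below) =====
def Claim_equal_get_y_label : Prop := ∀ (var : List String), Dom_get_y_label var → Spec_get_y_label var (get_y_label var)

-- ===== LEMMAS AND PROOFS =====

-- the flag-vector fold computes exactly the six all-checks, ANDed with the start flags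
theorem pvFlags_fold (var : List String) : ∀ (f0 f1 f2 f3 f4 f5 : Bool),
    var.foldl pvStep [f0, f1, f2, f3, f4, f5] =
      [f0 && var.all (fun var_str => PySem.Str.isIn "norm_" var_str),
       f1 && var.all (fun var_str => PySem.Str.isIn "slice_emit" var_str),
       f2 && var.all (fun var_str => PySem.Str.isIn "sigma_" var_str),
       f3 && var.all (fun var_str => PySem.Str.isIn "sigma_t" var_str),
       f4 && var.all (fun var_str => PySem.Str.isIn "charge" var_str),
       f5 && var.all (fun var_str => PySem.Str.isIn "energy" var_str)] := by
  induction var with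
  | nil => intro f0 f1 f2 f3 f4 f5; simp [List.all]
  | cons s t ih =>
      intro f0 f1 f2 f3 f4 f5
      simp only [List.foldl_cons, pvStep, pvTable, List.zip, List.zipWith, List.map, ih,
        List.all_cons, Bool.and_assoc]

theorem get_y_label_spec : Claim_equal_get_y_label := by
  intro var _
  unfold Spec_get_y_label get_y_label get_y_label_alt
  rw [show List.replicate pvTable.length true = [true, true, true, true, true, true] from rfl,
    pvFlags_fold]
  generalize var.all (fun var_str => PySem.Str.isIn "norm_" var_str) = b0
  generalize var.all (fun var_str => PySem.Str.isIn "slice_emit" var_str) = b1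
  generalize var.all (fun var_str => PySem.Str.isIn "sigma_" var_str) = b2
  generalize var.all (fun var_str => PySem.Str.isIn "sigma_t" var_str) = b3
  generalize var.all (fun var_str => PySem.Str.isIn "charge" var_str) = b4
  generalize var.all (fun var_str => PySem.Str.isIn "energy" var_str) = b5
  cases b0 <;> cases b1 <;> cases b2 <;> cases b3 <;> cases b4 <;> cases b5 <;> rfl
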